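-- pv_equiv track=rewrite | github.com/benquick123/code-profiling | code/batch-2/vse-naloge-brez-testov/DN7-M-236.py | varen_premik
-- ===== SOURCE A (Python) =====
-- def varen_premik(x0, y0, x1, y1, mine):
--     if(x0==x1 and y0<=y1):
--         for i in range(y0,y1+1):
--             if((x0,i) in mine):
--                 return False
--     if(x0==x1 and y0>=y1):
--         for i in range(y1,y0+1):
--             if((x0,i) in mine):
--                 return False
--     if(y0==y1 and x0<=x1):
--         for i in range(x0, x1+1):
--             if ((i, y0) in mine):
--                 return False
--     if(y0==y1 and x0>=x1):
--         for i in range(x1, x0+1):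
--             if ((i, y0) in mine):
--                 return False
--
--     return True
-- ===== SOURCE B (Python) =====
-- def varen_premik(x0, y0, x1, y1, mine):
--     for (mx, my) in mine:
--         if x0 == x1 and mx == x0 and min(y0, y1) <= my <= max(y0, y1):
--             return False
--         if y0 == y1 and my == y0 and min(x0, x1) <= mx <= max(x0, x1):
--             return False
--     return True
-- ===== Notes on version B (the rewrite author's own statement) =====
-- stated objective: faster
-- what changed: Instead of walking every cell of the segment and testing membership in the mine collection for each, B makes one pass over the mines and tests each mine for geometric containment in the segment.
import Mathlib
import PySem

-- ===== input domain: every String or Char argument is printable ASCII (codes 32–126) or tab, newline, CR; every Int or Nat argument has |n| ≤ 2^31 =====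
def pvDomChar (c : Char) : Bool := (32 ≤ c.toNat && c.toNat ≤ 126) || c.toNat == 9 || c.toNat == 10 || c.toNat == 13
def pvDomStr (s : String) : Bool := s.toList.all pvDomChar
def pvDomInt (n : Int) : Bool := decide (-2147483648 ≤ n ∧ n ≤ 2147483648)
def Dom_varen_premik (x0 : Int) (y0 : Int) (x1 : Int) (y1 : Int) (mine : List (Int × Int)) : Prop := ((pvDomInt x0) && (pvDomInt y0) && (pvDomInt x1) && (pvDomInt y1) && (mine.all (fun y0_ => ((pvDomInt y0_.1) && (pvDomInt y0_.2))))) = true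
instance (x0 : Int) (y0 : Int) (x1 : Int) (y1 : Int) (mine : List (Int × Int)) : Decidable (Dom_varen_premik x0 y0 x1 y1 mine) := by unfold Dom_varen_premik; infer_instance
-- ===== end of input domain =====

-- B replaces A's per-cell scan of the segment (membership test per cell) by a single
-- pass over the mines testing geometric containment; faster when the segment is long.


-- ===== PORT A =====
-- Four sequential guarded loops with early 'return False'; each loop over a range
-- testing '(…, i) in mine' becomes List.any over PySem.List.pyRange.
def varen_premik (x0 : Int) (y0 : Int) (x1 : Int) (y1 : Int) (mine : List (Int × Int)) : Bool :=
  if (decide (x0 = x1) && decide (y0 ≤ y1))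
      && (PySem.List.pyRange y0 (y1 + 1) 1).any (fun i => decide ((x0, i) ∈ mine)) then false
  else if (decide (x0 = x1) && decide (y1 ≤ y0))
      && (PySem.List.pyRange y1 (y0 + 1) 1).any (fun i => decide ((x0, i) ∈ mine)) then false
  else if (decide (y0 = y1) && decide (x0 ≤ x1))
      && (PySem.List.pyRange x0 (x1 + 1) 1).any (fun i => decide ((i, y0) ∈ mine)) then false
  else if (decide (y0 = y1) && decide (x1 ≤ x0))
      && (PySem.List.pyRange x1 (x0 + 1) 1).any (fun i => decide ((i, y0) ∈ mine)) then false
  else true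

-- ===== PORT B =====
-- One pass over the mines: a mine kills the move iff it lies on the (vertical or
-- horizontal) segment; the early-return loop of Source B is List.all.
def varen_premik_alt (x0 : Int) (y0 : Int) (x1 : Int) (y1 : Int) (mine : List (Int × Int)) : Bool :=
  mine.all (fun m =>
    !((decide (x0 = x1) && decide (m.1 = x0) && decide (min y0 y1 ≤ m.2) && decide (m.2 ≤ max y0 y1))
      || (decide (y0 = y1) && decide (m.2 = y0) && decide (min x0 x1 ≤ m.1) && decide (m.1 ≤ max x0 x1))))

-- ===== PRECONDITION & SPEC =====
def Spec_varen_premik (x0 : Int) (y0 : Int) (x1 : Int) (y1 : Int) (mine : List (Int × Int)) (out : Bool) : Prop := out = varen_premik_alt x0 y0 x1 y1 mine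
instance (x0 : Int) (y0 : Int) (x1 : Int) (y1 : Int) (mine : List (Int × Int)) (out : Bool) : Decidable (Spec_varen_premik x0 y0 x1 y1 mine out) := by unfold Spec_varen_premik; infer_instance

-- ===== CLAIM (what is proved, stated in full; the proofs are below) =====
def Claim_equal_varen_premik : Prop := ∀ (x0 : Int) (y0 : Int) (x1 : Int) (y1 : Int) (mine : List (Int × Int)), Dom_varen_premik x0 y0 x1 y1 mine → Spec_varen_premik x0 y0 x1 y1 mine (varen_premik x0 y0 x1 y1 mine)

-- ===== LEMMAS AND PROOFS =====

-- ===== VERDICT (by name: the statement is the Claim_ definition above) =====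
theorem varen_premik_spec : Claim_equal_varen_premik := by
  intro x0 y0 x1 y1 mine _
  unfold Spec_varen_premik varen_premik varen_premik_alt
  split_ifs with h1 h2 h3 h4
  · simp only [Bool.and_eq_true, List.any_eq_true, decide_eq_true_eq,
      PySem.List.mem_pyRange_one] at h1
    obtain ⟨⟨hx, hy⟩, i, ⟨hi1, hi2⟩, hm⟩ := h1
    symm
    rw [List.all_eq_false]
    exact ⟨(x0, i), hm, by simp; omega⟩
  · simp only [Bool.and_eq_true, List.any_eq_true, decide_eq_true_eq,
      PySem.List.mem_pyRange_one] at h2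
    obtain ⟨⟨hx, hy⟩, i, ⟨hi1, hi2⟩, hm⟩ := h2
    symm
    rw [List.all_eq_false]
    exact ⟨(x0, i), hm, by simp; omega⟩
  · simp only [Bool.and_eq_true, List.any_eq_true, decide_eq_true_eq,
      PySem.List.mem_pyRange_one] at h3
    obtain ⟨⟨hx, hy⟩, i, ⟨hi1, hi2⟩, hm⟩ := h3
    symm
    rw [List.all_eq_false]
    exact ⟨(i, y0), hm, by simp; omega⟩
  · simp only [Bool.and_eq_true, List.any_eq_true, decide_eq_true_eq,
      PySem.List.mem_pyRange_one] at h4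
    obtain ⟨⟨hx, hy⟩, i, ⟨hi1, hi2⟩, hm⟩ := h4
    symm
    rw [List.all_eq_false]
    exact ⟨(i, y0), hm, by simp; omega⟩
  · simp only [Bool.and_eq_true, List.any_eq_true, decide_eq_true_eq,
      PySem.List.mem_pyRange_one] at h1 h2 h3 h4
    symm
    rw [List.all_eq_true]
    intro m hm
    simp only [Bool.not_eq_eq_eq_not, Bool.not_true, Bool.or_eq_false_iff]
    push Not at h1 h2 h3 h4
    constructor
    · by_contra hc
      simp only [Bool.and_eq_true, decide_eq_true_eq, Bool.not_eq_false] at hc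
      obtain ⟨⟨⟨hx, hm1⟩, hlo⟩, hhi⟩ := hc
      rcases le_total y0 y1 with hy | hy
      · exact absurd hm (by
          have := h1 ⟨hx, hy⟩ m.2 ⟨by omega, by omega⟩
          simpa [← hm1] using this)
      · exact absurd hm (by
          have := h2 ⟨hx, hy⟩ m.2 ⟨by omega, by omega⟩
          simpa [← hm1] using this)
    · by_contra hc
      simp only [Bool.and_eq_true, decide_eq_true_eq, Bool.not_eq_false] at hc
      obtain ⟨⟨⟨hy, hm2⟩, hlo⟩, hhi⟩ := hc
      rcases le_total x0 x1 with hx | hx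
      · exact absurd hm (by
          have := h3 ⟨hy, hx⟩ m.1 ⟨by omega, by omega⟩
          simpa [← hm2] using this)
      · exact absurd hm (by
          have := h4 ⟨hy, hx⟩ m.1 ⟨by omega, by omega⟩
          simpa [← hm2] using this)
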